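-- pv_equiv track=rewrite | github.com/KostiaUek/pp1 | 04-Subroutines/AFTER CLASS/task41.py | f
-- ===== SOURCE A (Python) =====
-- def f(n):
--     i = 0
--     number = 0
--     while i <= n:
--         while True:
--             number += 1
--             if number in [2, 3, 5] or number % 2 != 0 and number % 3 != 0 and number % 5 != 0:
--                 break
--         i += 1
--
--     return number
-- ===== SOURCE B (Python) =====
-- def f(n):
--     if n < 0:
--         return 0
--     if n == 0:
--         return 1
--     if n == 1:
--         return 2
--     if n == 2:
--         return 3
--     if n == 3:
--         return 5
--     m = n - 3
--     q, r = divmod(m, 8)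
--     return 30 * q + [1, 7, 11, 13, 17, 19, 23, 29][r]
-- ===== Notes on version B (the rewrite author's own statement) =====
-- stated objective: faster
-- what changed: Replaces the nested counting loops with O(1) closed-form indexing into the 30-periodic wheel of residues coprime to 30 (with 1,2,3,5 special-cased).
import Mathlib
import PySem

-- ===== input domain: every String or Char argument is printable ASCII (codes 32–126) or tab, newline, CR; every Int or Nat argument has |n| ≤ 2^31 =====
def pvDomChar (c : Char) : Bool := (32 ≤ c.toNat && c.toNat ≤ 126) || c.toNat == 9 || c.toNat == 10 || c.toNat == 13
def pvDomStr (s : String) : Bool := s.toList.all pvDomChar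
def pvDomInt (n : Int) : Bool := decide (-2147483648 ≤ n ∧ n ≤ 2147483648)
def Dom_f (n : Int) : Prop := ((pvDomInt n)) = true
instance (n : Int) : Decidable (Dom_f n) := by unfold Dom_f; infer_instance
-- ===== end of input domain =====

-- B replaces A's nested counting loops with O(1) closed-form indexing into the
-- 30-periodic wheel of residues coprime to 30 (1,2,3,5 special-cased).

-- ===== PORT A =====
-- the break condition of the inner `while True` loop
def fAccept (m : Int) : Bool :=
  m == 2 || m == 3 || m == 5 || (m % 2 != 0 && m % 3 != 0 && m % 5 != 0)

-- inner `while True` loop: `number += 1; if <cond>: break`.  Python's loop has no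
-- fuel; fuel 30 is enough because every window of 30 consecutive integers contains
-- an accepted number (consecutive accepted numbers are at most 6 apart).
def fInner : Nat → Int → Int
  | 0, number => number
  | fuel + 1, number =>
      if fAccept (number + 1) then number + 1 else fInner fuel (number + 1)

-- outer `while i <= n` loop, run (n+1).toNat times
def fOuter : Nat → Int → Int
  | 0, number => number
  | k + 1, number => fOuter k (fInner 30 number)

def f (n : Int) : Int := fOuter (n + 1).toNat 0

-- ===== PORT B =====
def fWheel : List Int := [1, 7, 11, 13, 17, 19, 23, 29]

def f_alt (n : Int) : Int :=
  if n < 0 then 0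
  else if n = 0 then 1
  else if n = 1 then 2
  else if n = 2 then 3
  else if n = 3 then 5
  else
    -- m = n - 3, q = m // 8, r = m % 8; r ∈ [0,8), so `[...][r]` never raises and getD 0 is exact
    30 * PySem.Int.floordiv (n - 3) 8 +
      (PySem.List.pyGet? fWheel (PySem.Int.mod (n - 3) 8)).getD 0

-- ===== PRECONDITION & SPEC =====
def Spec_f (n : Int) (out : Int) : Prop := out = f_alt n
instance (n : Int) (out : Int) : Decidable (Spec_f n out) := by unfold Spec_f; infer_instance

-- ===== CLAIM (what is proved, stated in full; the proofs are below) =====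
def Claim_equal_f : Prop := ∀ (n : Int), Dom_f n → Spec_f n (f n)

-- ===== LEMMAS AND PROOFS =====

-- closed form is ≥ 5 from index 3 on (needed for the periodicity argument)
lemma f_alt_ge5 (n : Int) (h : 3 ≤ n) : 5 ≤ f_alt n := by
  unfold f_alt
  split_ifs with h0 h1 h2 h3 h4 <;> try omega
  have hd : PySem.Int.floordiv (n - 3) 8 = (n - 3) / 8 :=
    PySem.Int.floordiv_eq_ediv_of_pos (by omega)
  have hm : PySem.Int.mod (n - 3) 8 = (n - 3) % 8 :=
    PySem.Int.mod_eq_emod_of_pos (by omega)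
  rw [hd, hm]
  have hq : 0 ≤ (n - 3) / 8 := by omega
  have hr : 0 ≤ (n - 3) % 8 ∧ (n - 3) % 8 < 8 := by omega
  have hnz : ¬ ((n - 3) / 8 = 0 ∧ (n - 3) % 8 = 0) := by omega
  rcases hr with ⟨hr0, hr8⟩
  interval_cases h : (n - 3) % 8 <;>
    simp [fWheel, PySem.List.pyGet?, PySem.List.pyIdx?] <;> omega

-- the closed form shifts by 30 every 8 indices
lemma f_alt_shift (n : Int) (h : 4 ≤ n) : f_alt (n + 8) = f_alt n + 30 := by
  unfold f_alt
  split_ifs with h0 h1 h2 h3 h4 h5 h6 h7 h8 h9 <;> try omega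
  have hd : PySem.Int.floordiv (n + 8 - 3) 8 = (n - 3) / 8 + 1 := by
    rw [PySem.Int.floordiv_eq_ediv_of_pos (by omega)]; omega
  have hd' : PySem.Int.floordiv (n - 3) 8 = (n - 3) / 8 :=
    PySem.Int.floordiv_eq_ediv_of_pos (by omega)
  have hm : PySem.Int.mod (n + 8 - 3) 8 = PySem.Int.mod (n - 3) 8 := by
    rw [PySem.Int.mod_eq_emod_of_pos (by omega), PySem.Int.mod_eq_emod_of_pos (by omega)]
    omega
  rw [hd, hd', hm]
  ring

-- accept is 30-periodic above 5
lemma fAccept_add30 (m : Int) (h : 6 ≤ m) : fAccept (m + 30) = fAccept m := by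
  have e2 : (m + 30) % 2 = m % 2 := by omega
  have e3 : (m + 30) % 3 = m % 3 := by omega
  have e5 : (m + 30) % 5 = m % 5 := by omega
  have b2 : (m + 30 == 2) = false := by simp; omega
  have b3 : (m + 30 == 3) = false := by simp; omega
  have b5 : (m + 30 == 5) = false := by simp; omega
  have c2 : (m == 2) = false := by simp; omega
  have c3 : (m == 3) = false := by simp; omega
  have c5 : (m == 5) = false := by simp; omega
  simp [fAccept, e2, e3, e5, b2, b3, b5, c2, c3, c5]

-- the inner loop is 30-periodic above 5
lemma fInner_add30 : ∀ (fuel : Nat) (m : Int), 5 ≤ m →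
    fInner fuel (m + 30) = fInner fuel m + 30 := by
  intro fuel
  induction fuel with
  | zero => intro m _; simp [fInner]
  | succ k ih =>
      intro m hm
      show fInner (k + 1) (m + 30) = fInner (k + 1) m + 30
      unfold fInner
      have e : m + 30 + 1 = (m + 1) + 30 := by ring
      rw [e, fAccept_add30 (m + 1) (by omega)]
      by_cases h : fAccept (m + 1)
      · simp [h]
      · simp [h]; exact ih (m + 1) (by omega)

-- one outer iteration advances the closed form by one index
lemma fInner_step : ∀ (k : Nat), fInner 30 (f_alt k) = f_alt (k + 1) := by
  intro k
  induction k using Nat.strong_induction_on with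
  | _ k ih =>
    by_cases hk : k < 12
    · interval_cases k <;> decide
    · have h8 : k - 8 + 8 = k := by omega
      have hj4 : (4 : Int) ≤ (k - 8 : Nat) := by omega
      have e1 : ((k : Nat) : Int) = ((k - 8 : Nat) : Int) + 8 := by omega
      have e2 : ((k - 8 : Nat) : Int) + 8 + 1 = ((k - 8 + 1 : Nat) : Int) + 8 := by push_cast; ring
      rw [e1,
        f_alt_shift _ hj4, fInner_add30 30 _ (f_alt_ge5 _ (by omega))]
      have ih' := ih (k - 8) (by omega)
      push_cast at ih'
      rw [ih', e2, f_alt_shift _ (by push_cast; omega)]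
      push_cast
      ring_nf

-- the outer loop from index j runs the closed form forward
lemma fOuter_closed : ∀ (t j : Nat), fOuter t (f_alt j) = f_alt (j + t) := by
  intro t
  induction t with
  | zero => intro j; simp [fOuter]
  | succ s ih =>
      intro j
      show fOuter (s + 1) (f_alt j) = _
      unfold fOuter
      have h1 := fInner_step j
      have h2 := ih (j + 1)
      push_cast at h1 h2 ⊢
      rw [h1, h2]
      ring_nf

-- ===== VERDICT (by name: the statement is the Claim_ definition above) =====
theorem f_spec : Claim_equal_f := by
  intro n _
  unfold Spec_f f
  by_cases hn : n < 0
  · have : (n + 1).toNat = 0 := by omega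
    rw [this]
    simp [fOuter, f_alt, hn]
  · have ht : (n + 1).toNat = n.toNat + 1 := by omega
    rw [ht]
    show fOuter (n.toNat + 1) 0 = f_alt n
    unfold fOuter
    have h0 : fInner 30 0 = f_alt ((0 : Nat) : Int) := by decide
    have hc := fOuter_closed n.toNat 0
    rw [h0, hc]
    congr 1
    omega
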